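-- pv_equiv track=rewrite | github.com/wired32/ascii-player | src/utils/file/tools.py | unpack_low
-- ===== SOURCE A (Python) =====
-- BRIGHTNESS_LEVELS_LOW = " .-+*wGHM#&%@\n"
--
-- def unpack_low(packed_bytes):
--     bit_buffer = 0
--     bit_count = 0
--     result = []
--
--     for byte in packed_bytes:
--         bit_buffer = (bit_buffer << 8) | byte
--         bit_count += 8
--
--         while bit_count >= 4:
--             bit_count -= 4
--             value = (bit_buffer >> bit_count) & 0x0F
--             if value < len(BRIGHTNESS_LEVELS_LOW):
--                 result.append(BRIGHTNESS_LEVELS_LOW[value])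
--
--     return ''.join(result)
-- ===== SOURCE B (Python) =====
-- BRIGHTNESS_LEVELS_LOW = " .-+*wGHM#&%@\n"
--
-- # 256-entry table: the two nibble characters contributed by each byte value.
-- _TABLE = [
--     (BRIGHTNESS_LEVELS_LOW[v >> 4] if v >> 4 < 14 else "")
--     + (BRIGHTNESS_LEVELS_LOW[v & 0x0F] if v & 0x0F < 14 else "")
--     for v in range(256)
-- ]
--
-- def unpack_low(packed_bytes):
--     return "".join(_TABLE[b & 0xFF] for b in packed_bytes)
-- ===== Notes on version B (the rewrite author's own statement) =====
-- stated objective: faster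
-- what changed: Replaced the bit-buffer/bit-count state machine (whose buffer is an ever-growing bignum) with a precomputed 256-entry nibble-pair table indexed by byte & 0xFF and one flat join.
import Mathlib
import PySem

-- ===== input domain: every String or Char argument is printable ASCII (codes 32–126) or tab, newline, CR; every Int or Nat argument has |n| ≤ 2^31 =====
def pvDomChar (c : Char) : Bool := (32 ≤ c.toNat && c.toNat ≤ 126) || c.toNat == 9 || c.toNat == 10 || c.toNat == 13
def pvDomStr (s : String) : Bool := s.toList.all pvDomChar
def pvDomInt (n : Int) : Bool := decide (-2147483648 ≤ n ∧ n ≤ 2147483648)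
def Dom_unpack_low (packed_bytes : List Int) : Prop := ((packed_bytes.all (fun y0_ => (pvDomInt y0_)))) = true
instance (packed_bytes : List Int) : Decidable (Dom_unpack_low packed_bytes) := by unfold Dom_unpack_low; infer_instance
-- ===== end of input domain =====

-- B replaces A's growing bit-buffer state machine by a precomputed 256-entry nibble-pair
-- table indexed by byte & 0xFF (objective: faster, measured).

-- BRIGHTNESS_LEVELS_LOW = " .-+*wGHM#&%@\n"  (module constant shared by both programs; length 14)
def pvLevels : List Char := " .-+*wGHM#&%@\n".toList

-- ===== PORT A =====
-- the body of 'while bit_count >= 4' (structural recursion: bit_count drops by 4 each pass)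
def pvWhile (bit_buffer : Int) (bit_count : Int) (result : List Char) : Int × List Char :=
  if _h : 4 ≤ bit_count then
    let bc := bit_count - 4
    -- value = (bit_buffer >> bit_count) & 0x0F  (the shift amount is nonnegative here)
    let value := PySem.Int.band (bit_buffer >>> bc.toNat) 15
    -- 'value < len(BRIGHTNESS_LEVELS_LOW)' : len = 14; the index is then provably in
    -- range, so the pyGetD default is never used
    let result := if value < 14 then result ++ [PySem.List.pyGetD pvLevels value ' '] else result
    pvWhile bit_buffer bc result
  else
    (bit_count, result)
termination_by bit_count.toNat
decreasing_by omega

def pvStep (st : Int × Int × List Char) (byte : Int) : Int × Int × List Char :=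
  let buf := PySem.Int.bor (st.1 <<< (8 : Nat)) byte
  let cnt := st.2.1 + 8
  let wr := pvWhile buf cnt st.2.2
  (buf, wr.1, wr.2)

def unpack_low (packed_bytes : List Int) : String :=
  let fin := packed_bytes.foldl pvStep (0, 0, [])
  String.ofList fin.2.2

-- ===== PORT B =====
-- _TABLE: for each byte value v, the (0..2) characters its two nibbles contribute
def pvTable : List (List Char) :=
  (List.range 256).map (fun v =>
    (if v >>> 4 < 14 then [pvLevels.getD (v >>> 4) ' '] else [])
      ++ (if v &&& 15 < 14 then [pvLevels.getD (v &&& 15) ' '] else []))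

def unpack_low_alt (packed_bytes : List Int) : String :=
  String.ofList (packed_bytes.flatMap (fun b => PySem.List.pyGetD pvTable (PySem.Int.band b 255) []))

-- ===== PRECONDITION & SPEC =====
def Spec_unpack_low (packed_bytes : List Int) (out : String) : Prop := out = unpack_low_alt packed_bytes
instance (packed_bytes : List Int) (out : String) : Decidable (Spec_unpack_low packed_bytes out) := by unfold Spec_unpack_low; infer_instance

-- ===== CLAIM (what is proved, stated in full; the proofs are below) =====
def Claim_equal_unpack_low : Prop := ∀ (packed_bytes : List Int), Dom_unpack_low packed_bytes → Spec_unpack_low packed_bytes (unpack_low packed_bytes)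

-- ===== LEMMAS AND PROOFS =====

-- Nat bitwise-vs-mod facts
theorem pv_nat_and_mod (m n k : Nat) : (m &&& n) % 2 ^ k = (m % 2 ^ k) &&& (n % 2 ^ k) := by
  apply Nat.eq_of_testBit_eq
  intro i
  simp [Nat.testBit_mod_two_pow, Nat.testBit_and]
  by_cases h : i < k <;> simp [h]

theorem pv_nat_or_mod (m n k : Nat) : (m ||| n) % 2 ^ k = (m % 2 ^ k) ||| (n % 2 ^ k) := by
  apply Nat.eq_of_testBit_eq
  intro i
  simp [Nat.testBit_mod_two_pow]
  by_cases h : i < k <;> simp [h]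

theorem pv_nat_and15 (n : Nat) : n &&& 15 = n % 16 := by
  have := Nat.and_two_pow_sub_one_eq_mod n 4; norm_num at this; exact this

theorem pv_nat_and255 (n : Nat) : n &&& 255 = n % 256 := by
  have := Nat.and_two_pow_sub_one_eq_mod n 8; norm_num at this; exact this

theorem pv_255_and_small (t : Nat) (ht : t < 256) : 255 &&& t = t := by
  rw [Nat.and_comm, pv_nat_and255]; omega

-- Python & with a low mask is emod
theorem pv_band15 (x : Int) : PySem.Int.band x 15 = x % 16 := by
  unfold PySem.Int.band
  split_ifs with hx h15 h15
  · rw [show Int.toNat 15 = 15 from rfl, pv_nat_and15]; omega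
  · norm_num at h15
  · rw [show Int.toNat 15 = 15 from rfl, Nat.and_comm, pv_nat_and15]; omega
  · norm_num at h15

theorem pv_band255 (x : Int) : PySem.Int.band x 255 = x % 256 := by
  unfold PySem.Int.band
  split_ifs with hx h255 h255
  · rw [show Int.toNat 255 = 255 from rfl, pv_nat_and255]; omega
  · norm_num at h255
  · rw [show Int.toNat 255 = 255 from rfl, Nat.and_comm, pv_nat_and255]; omega
  · norm_num at h255

theorem pv_shr4 (x : Int) : x >>> (4 : Nat) = x / 16 := by
  have := Int.shiftRight_eq_div_pow x 4; norm_num at this; exact this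

theorem pv_shl8 (a : Int) : a <<< (8 : Nat) = a * 256 := by
  have := Int.shiftLeft_eq a 8; norm_num at this; exact this

-- the low byte of (a << 8) | b is the low byte of b
theorem pv_bor_mod (a b : Int) : PySem.Int.bor (a <<< (8 : Nat)) b % 256 = b % 256 := by
  rw [pv_shl8]
  unfold PySem.Int.bor
  split_ifs with hx hb hb
  · -- both nonnegative
    have h1 : ((a * 256).toNat ||| b.toNat) % 256 = ((a * 256).toNat % 256) ||| (b.toNat % 256) := by
      have := pv_nat_or_mod (a * 256).toNat b.toNat 8; norm_num at this; exact this
    have h2 : (a * 256).toNat % 256 = 0 := by omega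
    rw [h2, Nat.zero_or] at h1
    omega
  · -- a*256 ≥ 0, b < 0
    set N := (-b - 1).toNat with hN
    have h1 : (N &&& (a * 256).toNat) % 256 = (N % 256) &&& ((a * 256).toNat % 256) := by
      have := pv_nat_and_mod N (a * 256).toNat 8; norm_num at this; exact this
    have h2 : (a * 256).toNat % 256 = 0 := by omega
    rw [h2, Nat.and_zero] at h1
    have h3 : N &&& (a * 256).toNat ≤ N := Nat.and_le_left
    omega
  · -- a*256 < 0, b ≥ 0
    set M := (-(a * 256) - 1).toNat with hM
    have hM255 : M % 256 = 255 := by omega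
    have h1 : (M &&& b.toNat) % 256 = (M % 256) &&& (b.toNat % 256) := by
      have := pv_nat_and_mod M b.toNat 8; norm_num at this; exact this
    rw [hM255, pv_255_and_small (b.toNat % 256) (by omega)] at h1
    have h3 : M &&& b.toNat ≤ M := Nat.and_le_left
    omega
  · -- both negative
    set M := (-(a * 256) - 1).toNat with hM
    set N := (-b - 1).toNat with hN
    have hM255 : M % 256 = 255 := by omega
    have h1 : (M &&& N) % 256 = (M % 256) &&& (N % 256) := by
      have := pv_nat_and_mod M N 8; norm_num at this; exact this
    rw [hM255, pv_255_and_small (N % 256) (by omega)] at h1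
    omega

-- the two characters A appends for one byte, as a function of the buffer
def pvChunk (buf : Int) : List Char :=
  (if PySem.Int.band (buf >>> (4 : Nat)) 15 < 14 then
      [PySem.List.pyGetD pvLevels (PySem.Int.band (buf >>> (4 : Nat)) 15) ' '] else [])
    ++ (if PySem.Int.band buf 15 < 14 then
      [PySem.List.pyGetD pvLevels (PySem.Int.band buf 15) ' '] else [])

theorem pv_while8 (buf : Int) (res : List Char) :
    pvWhile buf 8 res = (0, res ++ pvChunk buf) := by
  rw [pvWhile]; norm_num
  rw [pvWhile]; norm_num
  rw [pvWhile]; norm_num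
  unfold pvChunk
  simp only [show Int.toNat 4 = (4 : Nat) from rfl]
  split_ifs <;> simp

-- B's table entry at a nonnegative in-range index
theorem pv_table_entry (v : Nat) (hv : v < 256) :
    PySem.List.pyGetD pvTable (v : Int) [] =
      (if v >>> 4 < 14 then [pvLevels.getD (v >>> 4) ' '] else [])
        ++ (if v &&& 15 < 14 then [pvLevels.getD (v &&& 15) ' '] else []) := by
  rw [PySem.List.pyGetD_natCast]
  rw [List.getD_eq_getElem?_getD, List.getElem?_eq_getElem (by simp [pvTable]; omega)]
  simp [pvTable]

-- per byte, A's chunk equals B's table lookup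
theorem pv_chunk_eq (a b : Int) :
    pvChunk (PySem.Int.bor (a <<< (8 : Nat)) b) =
      PySem.List.pyGetD pvTable (PySem.Int.band b 255) [] := by
  set x := PySem.Int.bor (a <<< (8 : Nat)) b with hx
  have hmod : x % 256 = b % 256 := pv_bor_mod a b
  set v : Nat := (b % 256).toNat with hv
  have hv256 : v < 256 := by omega
  have hcast : PySem.Int.band b 255 = (v : Int) := by rw [pv_band255]; omega
  rw [hcast, pv_table_entry v hv256]
  have hhi : PySem.Int.band (x >>> (4 : Nat)) 15 = ((v >>> 4 : Nat) : Int) := by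
    rw [pv_shr4, pv_band15, Nat.shiftRight_eq_div_pow]
    norm_num
    omega
  have hlo : PySem.Int.band x 15 = ((v &&& 15 : Nat) : Int) := by
    rw [pv_band15, pv_nat_and15]; omega
  unfold pvChunk
  rw [hhi, hlo, PySem.List.pyGetD_natCast, PySem.List.pyGetD_natCast]
  have c1 : (((v >>> 4 : Nat) : Int) < 14) ↔ (v >>> 4 < 14) := by exact_mod_cast Iff.rfl
  have c2 : (((v &&& 15 : Nat) : Int) < 14) ↔ (v &&& 15 < 14) := by exact_mod_cast Iff.rfl
  simp only [c1, c2]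

-- the loop invariant: bit_count is 0 entering every iteration
theorem pv_fold (bytes : List Int) : ∀ (buf : Int) (res : List Char),
    (bytes.foldl pvStep (buf, 0, res)).2.2 =
      res ++ bytes.flatMap (fun b => PySem.List.pyGetD pvTable (PySem.Int.band b 255) []) := by
  induction bytes with
  | nil => intro buf res; simp
  | cons b bs ih =>
    intro buf res
    have hstep : pvStep (buf, 0, res) b =
        (PySem.Int.bor (buf <<< (8 : Nat)) b, 0,
          res ++ PySem.List.pyGetD pvTable (PySem.Int.band b 255) []) := by
      simp only [pvStep]
      rw [show (0:Int) + 8 = 8 from rfl, pv_while8, pv_chunk_eq]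
    simp only [List.foldl_cons, hstep, ih]
    simp

-- ===== VERDICT (by name: the statement is the Claim_ definition above) =====
theorem unpack_low_spec : Claim_equal_unpack_low := by
  intro packed_bytes _
  unfold Spec_unpack_low
  simp only [unpack_low, unpack_low_alt]
  rw [pv_fold]
  simp
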